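-- pv_equiv track=rewrite | github.com/stank2010/python_class | 04_P21.py | like
-- ===== SOURCE A (Python) =====
-- def like(a,b,mode):
--   stank = ""
--   A = len(a)
--   B = len(b)
--   i = 0
--   while (i<A and i<B and mode==1) or (A-i-1>=0 and B-i-1>=0 and mode==-1) :
--     if mode==1:
--       if a[i]!=b[i]:
--         return stank
--       stank = stank + a[i]
--
--     if mode==-1:
--       if a[A-i-1] != b[B-i-1]:
--         return stank
--       stank = a[A-i-1] + stank
--     i+=1
--   return stank
-- ===== SOURCE B (Python) =====
-- def like(a, b, mode):
--     if mode == 1: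
--         x, y = a, b
--     elif mode == -1:
--         x, y = a[::-1], b[::-1]
--     else:
--         return ""
--     out = []
--     for c, d in zip(x, y):
--         if c != d:
--             break
--         out.append(c)
--     s = "".join(out)
--     return s if mode == 1 else s[::-1]
-- ===== Notes on version B (the rewrite author's own statement) =====
-- stated objective: simpler
-- what changed: Replaced the dual end-anchored while loop with index arithmetic by a mode dispatch that reverses both strings for mode==-1 and runs one canonical common-prefix scan over zip, reversing the result back.
import Mathlib
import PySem

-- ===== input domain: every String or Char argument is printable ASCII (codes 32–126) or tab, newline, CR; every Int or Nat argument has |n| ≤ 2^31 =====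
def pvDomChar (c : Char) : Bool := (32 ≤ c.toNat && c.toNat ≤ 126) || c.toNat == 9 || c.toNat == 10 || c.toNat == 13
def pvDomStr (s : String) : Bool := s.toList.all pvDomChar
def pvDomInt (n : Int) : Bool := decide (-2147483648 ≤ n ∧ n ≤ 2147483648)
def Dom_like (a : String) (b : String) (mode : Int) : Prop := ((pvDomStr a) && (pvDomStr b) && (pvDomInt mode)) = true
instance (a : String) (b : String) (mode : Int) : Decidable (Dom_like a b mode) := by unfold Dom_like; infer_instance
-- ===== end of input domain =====

-- B unifies both modes through reversal and one front scan; A's dual-index while loop is ported literally.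

-- ===== PORT A =====
-- literal port of A's while loop; the indexed accesses a[i], a[A-i-1] are in range
-- whenever the loop condition holds, so getD never takes its default.
def likeLoop (la lb : List Char) (mode : Int) (stank : List Char) (i : Nat) : List Char :=
  if h : (i < la.length ∧ i < lb.length ∧ mode = 1) ∨
         ((la.length : Int) - i - 1 ≥ 0 ∧ (lb.length : Int) - i - 1 ≥ 0 ∧ mode = -1) then
    if mode = 1 then
      let c := la.getD i default
      if c ≠ lb.getD i default then stank
      else likeLoop la lb mode (stank ++ [c]) (i + 1)
    else
      let c := la.getD (la.length - i - 1) default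
      if c ≠ lb.getD (lb.length - i - 1) default then stank
      else likeLoop la lb mode (c :: stank) (i + 1)
  else stank
termination_by la.length - i
decreasing_by all_goals omega

def like (a : String) (b : String) (mode : Int) : String :=
  String.ofList (likeLoop a.toList b.toList mode [] 0)

-- ===== PORT B =====
-- the single common-prefix scan (for over zip with break in Source B)
def cpfx : List Char → List Char → List Char
  | c :: cs, d :: ds => if c = d then c :: cpfx cs ds else []
  | _, _ => []

def like_alt (a : String) (b : String) (mode : Int) : String :=
  if mode = 1 then String.ofList (cpfx a.toList b.toList)
  else if mode = -1 then String.ofList ((cpfx a.toList.reverse b.toList.reverse).reverse)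
  else ""

-- ===== PRECONDITION & SPEC =====
def Spec_like (a : String) (b : String) (mode : Int) (out : String) : Prop := out = like_alt a b mode
instance (a : String) (b : String) (mode : Int) (out : String) : Decidable (Spec_like a b mode out) := by unfold Spec_like; infer_instance

-- ===== CLAIM (what is proved, stated in full; the proofs are below) =====
def Claim_equal_like : Prop := ∀ (a : String) (b : String) (mode : Int), Dom_like a b mode → Spec_like a b mode (like a b mode)

-- ===== LEMMAS AND PROOFS =====

lemma loop_one (la lb : List Char) : ∀ i stank,
    likeLoop la lb 1 stank i = stank ++ cpfx (la.drop i) (lb.drop i) := by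
  intro i
  induction h : la.length - i using Nat.strong_induction_on generalizing i with
  | _ n ih =>
    intro stank
    rw [likeLoop]
    by_cases hc : i < la.length ∧ i < lb.length
    · obtain ⟨h1, h2⟩ := hc
      rw [dif_pos (Or.inl ⟨h1, h2, rfl⟩), if_pos rfl]
      rw [List.drop_eq_getElem_cons h1, List.drop_eq_getElem_cons h2]
      simp only [cpfx, List.getD_eq_getElem?_getD, List.getElem?_eq_getElem h1,
        List.getElem?_eq_getElem h2, Option.getD_some]
      by_cases he : la[i] = lb[i]
      · rw [if_neg (by simp [he]), if_pos he,
          ih (la.length - (i + 1)) (by omega) (i + 1) rfl]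
        simp
      · rw [if_pos (by simp [he]), if_neg he, List.append_nil]
    · rw [dif_neg (by rintro (⟨h1, h2, _⟩ | ⟨_, _, h3⟩); exact hc ⟨h1, h2⟩; exact absurd h3 (by decide))]
      rcases not_and_or.mp hc with h1 | h1
      · rw [List.drop_eq_nil_of_le (by omega)]; simp [cpfx]
      · rw [List.drop_eq_nil_of_le (as := lb) (by omega)]
        cases la.drop i <;> simp [cpfx]

lemma loop_neg (la lb : List Char) : ∀ i stank,
    likeLoop la lb (-1) stank i = (cpfx (la.reverse.drop i) (lb.reverse.drop i)).reverse ++ stank := by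
  intro i
  induction h : la.length - i using Nat.strong_induction_on generalizing i with
  | _ n ih =>
    intro stank
    rw [likeLoop]
    by_cases hc : i < la.length ∧ i < lb.length
    · obtain ⟨h1, h2⟩ := hc
      rw [dif_pos (Or.inr ⟨by omega, by omega, rfl⟩), if_neg (by decide)]
      have h1' : i < la.reverse.length := by simpa using h1
      have h2' : i < lb.reverse.length := by simpa using h2
      rw [List.drop_eq_getElem_cons h1', List.drop_eq_getElem_cons h2']
      have e1 : la.getD (la.length - i - 1) default = la[la.length - 1 - i]'(by omega) := by
        rw [List.getD_eq_getElem _ _ (by omega)]; congr 1; omega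
      have e2 : lb.getD (lb.length - i - 1) default = lb[lb.length - 1 - i]'(by omega) := by
        rw [List.getD_eq_getElem _ _ (by omega)]; congr 1; omega
      simp only [cpfx, e1, e2, List.getElem_reverse]
      by_cases he : la[la.length - 1 - i]'(by omega) = lb[lb.length - 1 - i]'(by omega)
      · rw [if_neg (by simp [he]), if_pos he,
          ih (la.length - (i + 1)) (by omega) (i + 1) rfl]
        simp
      · rw [if_pos (by simp [he]), if_neg he]; simp
    · rw [dif_neg (by rintro (⟨h1, h2, h3⟩ | ⟨h1, h2, _⟩); exact absurd h3 (by decide); exact hc ⟨by omega, by omega⟩)]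
      rcases not_and_or.mp hc with h1 | h1
      · rw [List.drop_eq_nil_of_le (by simp; omega)]
        simp [cpfx]
      · rw [List.drop_eq_nil_of_le (as := lb.reverse) (by simp; omega)]
        cases la.reverse.drop i <;> simp [cpfx]

lemma loop_other (la lb : List Char) (mode : Int) (h1 : mode ≠ 1) (h2 : mode ≠ -1) :
    likeLoop la lb mode [] 0 = [] := by
  rw [likeLoop, dif_neg]
  rintro (⟨_, _, h⟩ | ⟨_, _, h⟩)
  · exact h1 h
  · exact h2 h

-- ===== VERDICT (by name: the statement is the Claim_ definition above) =====
theorem like_spec : Claim_equal_like := by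
  intro a b mode _
  unfold Spec_like like like_alt
  by_cases h1 : mode = 1
  · subst h1; rw [if_pos rfl, loop_one]; simp
  · by_cases h2 : mode = -1
    · subst h2; rw [if_neg (by decide), if_pos rfl, loop_neg]; simp
    · rw [if_neg h1, if_neg h2, loop_other _ _ _ h1 h2]
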